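-- pv_equiv track=rewrite | github.com/Kadaliharsha/astro | Astro6.py | calculate_name_number
-- ===== SOURCE A (Python) =====
-- def reduce_to_single_digit(num):
--     while num > 9:
--         num = sum(int(digit) for digit in str(num))
--     return num
--
-- def calculate_name_number(name):
--     letter_to_number = {
--         'A': 1, 'J': 1, 'S': 1,
--         'B': 2, 'K': 2, 'T': 2,
--         'C': 3, 'L': 3, 'U': 3,
--         'D': 4, 'M': 4, 'V': 4,
--         'E': 5, 'N': 5, 'W': 5,
--         'F': 6, 'O': 6, 'X': 6,
--         'G': 7, 'P': 7, 'Y': 7,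
--         'H': 8, 'Q': 8, 'Z': 8,
--         'I': 9, 'R': 9
--     }
--
--     # Sum the numeric values of each letter in the company name
--     total = sum(letter_to_number.get(char.upper(), 0) for char in name if char.isalpha())
--
--     # Reduce the sum to a single digit
--     name_number = reduce_to_single_digit(total)
--     return name_number
-- ===== SOURCE B (Python) =====
-- def calculate_name_number(name):
--     total = 0
--     for ch in name:
--         if ch.isalpha():
--             u = ch.upper()
--             if len(u) == 1 and 'A' <= u <= 'Z':
--                 total += (ord(u) - 65) % 9 + 1
--     return 0 if total == 0 else 1 + (total - 1) % 9
-- ===== Notes on version B (the rewrite author's own statement) =====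
-- stated objective: simpler
-- what changed: The 26-entry lookup table becomes the arithmetic formula ((ord(u)-65)%9)+1 per letter, and the iterative digit-sum reduction loop becomes the digital-root closed form 1+(total-1)%9 (0 for empty totals).
import Mathlib
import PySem

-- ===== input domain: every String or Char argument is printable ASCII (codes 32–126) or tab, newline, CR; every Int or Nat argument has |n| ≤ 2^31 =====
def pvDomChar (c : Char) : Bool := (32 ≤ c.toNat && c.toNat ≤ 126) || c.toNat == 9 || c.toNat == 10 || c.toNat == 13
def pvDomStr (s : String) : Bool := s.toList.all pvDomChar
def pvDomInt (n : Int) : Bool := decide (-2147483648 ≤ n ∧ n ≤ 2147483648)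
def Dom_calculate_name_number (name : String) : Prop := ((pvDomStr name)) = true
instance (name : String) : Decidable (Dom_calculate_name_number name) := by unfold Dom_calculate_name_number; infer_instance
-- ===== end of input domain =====

-- B replaces A's 26-entry lookup table by per-letter arithmetic and A's iterative digit-sum
-- reduction loop by the digital-root closed form (objective: simpler).

-- ===== PORT A =====
-- int(digit): in A, `digit` is always a decimal digit character of str(num) with num > 9, so the
-- ValueError branch of PySem.Int.ofChars? is unreachable; `.getD 0` only totalises the port.
def pvCharVal (d : Char) : Int := (PySem.Int.ofChars? [d]).getD 0

-- num = sum(int(digit) for digit in str(num))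
def pvDigitSum (num : Int) : Int := ((PySem.Int.toChars num).map pvCharVal).sum

-- termination facts for A's `while num > 9` loop (cited by `decreasing_by` below)
lemma pv_digits_sum_le (n : Nat) : (Nat.digits 10 n).sum ≤ n := by
  induction n using Nat.strong_induction_on with
  | _ n ih =>
    rcases Nat.eq_zero_or_pos n with h0 | hpos
    · simp [h0]
    · rw [Nat.digits_def' (by norm_num : 1 < 10) hpos]
      have := ih (n / 10) (Nat.div_lt_self hpos (by norm_num))
      simp only [List.sum_cons]
      omega

lemma pvCharVal_digitChar : ∀ r : Nat, r < 10 → pvCharVal r.digitChar = (r : Int) := by decide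

lemma pv_toDigitsCore_sum :
    ∀ (f n : Nat) (ds : List Char), n < f →
      ((Nat.toDigitsCore 10 f n ds).map pvCharVal).sum
        = ((Nat.digits 10 n).sum : Int) + (ds.map pvCharVal).sum := by
  intro f
  induction f with
  | zero => intro n ds h; omega
  | succ f ih =>
    intro n ds h
    rw [Nat.toDigitsCore]
    have hr : pvCharVal (n % 10).digitChar = ((n % 10 : Nat) : Int) :=
      pvCharVal_digitChar _ (Nat.mod_lt _ (by norm_num))
    by_cases h0 : n / 10 = 0
    · simp only [h0, if_true, List.map_cons, List.sum_cons, hr]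
      rcases Nat.eq_zero_or_pos n with hn0 | hnpos
      · subst hn0
        simp
      · rw [Nat.digits_def' (by norm_num : 1 < 10) hnpos, h0]
        simp only [Nat.digits_zero, List.sum_cons, List.sum_nil]
        push_cast
        ring
    · rw [if_neg h0]
      have hnpos : 0 < n := by
        rcases Nat.eq_zero_or_pos n with hn0 | hnpos
        · exact absurd (by simp [hn0]) h0
        · exact hnpos
      have hlt : n / 10 < f := by
        have := Nat.div_lt_self hnpos (by norm_num : 1 < 10)
        omega
      rw [ih (n / 10) ((n % 10).digitChar :: ds) hlt]
      rw [Nat.digits_def' (by norm_num : 1 < 10) hnpos]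
      simp only [List.map_cons, List.sum_cons, hr]
      push_cast
      ring

lemma pvDigitSum_natCast (m : Nat) : pvDigitSum (m : Int) = ((Nat.digits 10 m).sum : Int) := by
  have h : PySem.Int.toChars (m : Int) = Nat.toDigits 10 m := by
    simp [PySem.Int.toChars]
  rw [pvDigitSum, h, Nat.toDigits, pv_toDigitsCore_sum (m + 1) m [] (Nat.lt_succ_self m)]
  simp

lemma pvDigitSum_lt (num : Int) (h : 9 < num) : (pvDigitSum num).toNat < num.toNat := by
  have hm : num = ((num.toNat : Nat) : Int) := by omega
  have h10 : 10 ≤ num.toNat := by omega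
  rw [hm, pvDigitSum_natCast]
  have hle := pv_digits_sum_le (num.toNat / 10)
  rw [Nat.digits_def' (by norm_num : 1 < 10) (by omega : 0 < num.toNat)]
  simp only [List.sum_cons, Int.toNat_natCast]
  omega

def reduce_to_single_digit (num : Int) : Int :=
  if h : 9 < num then reduce_to_single_digit (pvDigitSum num) else num
termination_by num.toNat
decreasing_by exact pvDigitSum_lt num h

def pv_letter_to_number : PySem.Dict String Int :=
  ⟨[("A", 1), ("J", 1), ("S", 1),
    ("B", 2), ("K", 2), ("T", 2),
    ("C", 3), ("L", 3), ("U", 3),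
    ("D", 4), ("M", 4), ("V", 4),
    ("E", 5), ("N", 5), ("W", 5),
    ("F", 6), ("O", 6), ("X", 6),
    ("G", 7), ("P", 7), ("Y", 7),
    ("H", 8), ("Q", 8), ("Z", 8),
    ("I", 9), ("R", 9)]⟩

def calculate_name_number (name : String) : Int :=
  let total := name.toList.foldl
    (fun acc c =>
      if PySem.Chars.isalpha c then
        acc + PySem.Dict.getD pv_letter_to_number (PySem.Str.upper (String.ofList [c])) 0
      else acc) 0
  reduce_to_single_digit total

-- ===== PORT B =====
def calculate_name_number_alt (name : String) : Int :=
  let total := name.toList.foldl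
    (fun acc c =>
      if PySem.Chars.isalpha c then
        match PySem.Chars.upper [c] with
        | [u] => if 'A' ≤ u ∧ u ≤ 'Z' then acc + (((u.toNat - 65) % 9 : Nat) : Int) + 1 else acc
        | _ => acc
      else acc) 0
  if total = 0 then 0 else 1 + PySem.Int.mod (total - 1) 9

-- ===== PRECONDITION & SPEC =====
def Spec_calculate_name_number (name : String) (out : Int) : Prop := out = calculate_name_number_alt name
instance (name : String) (out : Int) : Decidable (Spec_calculate_name_number name out) := by unfold Spec_calculate_name_number; infer_instance

-- ===== CLAIM (what is proved, stated in full; the proofs are below) =====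
def Claim_equal_calculate_name_number : Prop := ∀ (name : String), Dom_calculate_name_number name → Spec_calculate_name_number name (calculate_name_number name)

-- ===== LEMMAS AND PROOFS =====
-- per-character contributions of the two loops
def pvContribA (c : Char) : Int :=
  if PySem.Chars.isalpha c then
    PySem.Dict.getD pv_letter_to_number (PySem.Str.upper (String.ofList [c])) 0
  else 0

def pvContribB (c : Char) : Int :=
  if PySem.Chars.isalpha c then
    match PySem.Chars.upper [c] with
    | [u] => if 'A' ≤ u ∧ u ≤ 'Z' then (((u.toNat - 65) % 9 : Nat) : Int) + 1 else 0
    | _ => 0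
  else 0

lemma pvContrib_eq_of_dom : ∀ n : Nat, n < 128 → pvContribA (Char.ofNat n) = pvContribB (Char.ofNat n) := by
  decide

lemma pvContribB_nonneg (c : Char) : 0 ≤ pvContribB c := by
  unfold pvContribB
  split
  · split
    · split
      · positivity
      · rfl
    · rfl
  · rfl

lemma pvFoldA (l : List Char) :
    l.foldl (fun acc c =>
      if PySem.Chars.isalpha c then
        acc + PySem.Dict.getD pv_letter_to_number (PySem.Str.upper (String.ofList [c])) 0
      else acc) 0 = (l.map pvContribA).sum := by
  rw [PySem.List.foldl_congr_mem l _ (fun acc c => acc + pvContribA c) 0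
    (by
      intro acc c _
      by_cases h : PySem.Chars.isalpha c <;> simp [pvContribA, h])]
  rw [PySem.List.foldl_add]
  simp

lemma pvFoldB (l : List Char) :
    l.foldl (fun acc c =>
      if PySem.Chars.isalpha c then
        match PySem.Chars.upper [c] with
        | [u] => if 'A' ≤ u ∧ u ≤ 'Z' then acc + (((u.toNat - 65) % 9 : Nat) : Int) + 1 else acc
        | _ => acc
      else acc) 0 = (l.map pvContribB).sum := by
  rw [PySem.List.foldl_congr_mem l _ (fun acc c => acc + pvContribB c) 0
    (by
      intro acc c _
      by_cases h : PySem.Chars.isalpha c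
      · simp only [pvContribB, if_pos h]
        cases PySem.Chars.upper [c] with
        | nil => simp
        | cons u t =>
          cases t with
          | nil =>
            by_cases hu : 'A' ≤ u ∧ u ≤ 'Z'
            · simp only [if_pos hu]; ring
            · simp [hu]
          | cons v t' => simp
      · simp [pvContribB, h])]
  rw [PySem.List.foldl_add]
  simp

lemma pv_digits_sum_pos (n : Nat) (h : 0 < n) : 0 < (Nat.digits 10 n).sum := by
  induction n using Nat.strong_induction_on with
  | _ n ih =>
    rw [Nat.digits_def' (by norm_num : 1 < 10) h]
    simp only [List.sum_cons]
    by_cases hr : 0 < n % 10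
    · omega
    · have hq : 0 < n / 10 := by omega
      have := ih (n / 10) (Nat.div_lt_self h (by norm_num)) hq
      omega

-- A's reduction loop computes the digital root (closed form)
lemma pv_reduce_natCast (m : Nat) :
    reduce_to_single_digit (m : Int)
      = if (m : Int) = 0 then 0 else 1 + PySem.Int.mod ((m : Int) - 1) 9 := by
  induction m using Nat.strong_induction_on with
  | _ m ih =>
    rw [reduce_to_single_digit]
    by_cases h : 9 < (m : Int)
    · rw [dif_pos h, pvDigitSum_natCast]
      have hm10 : 10 ≤ m := by omega
      have hslt : (Nat.digits 10 m).sum < m := by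
        have hle := pv_digits_sum_le (m / 10)
        rw [Nat.digits_def' (by norm_num : 1 < 10) (by omega : 0 < m)]
        simp only [List.sum_cons]
        omega
      have hspos : 0 < (Nat.digits 10 m).sum := pv_digits_sum_pos m (by omega)
      rw [ih _ hslt]
      have hmod : m % 9 = (Nat.digits 10 m).sum % 9 := Nat.modEq_nine_digits_sum m
      have hsne : ¬ ((Nat.digits 10 m).sum : Int) = 0 := by exact_mod_cast Nat.pos_iff_ne_zero.mp hspos
      rw [if_neg hsne, if_neg (by omega : ¬ (m : Int) = 0)]
      simp only [PySem.Int.mod_eq_emod_of_pos (by norm_num : (0:Int) < 9)]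
      have h1 : 1 ≤ (Nat.digits 10 m).sum := hspos
      omega
    · rw [dif_neg h]
      have hle : m ≤ 9 := by omega
      interval_cases m <;> decide

lemma pvContrib_eq_of_char (c : Char) (hc : pvDomChar c = true) : pvContribA c = pvContribB c := by
  have hn : c.toNat < 128 := by
    simp only [pvDomChar, Bool.or_eq_true, Bool.and_eq_true, decide_eq_true_eq, beq_iff_eq] at hc
    omega
  have := pvContrib_eq_of_dom c.toNat hn
  rwa [Char.ofNat_toNat] at this

-- ===== VERDICT (by name: the statement is the Claim_ definition above) =====
theorem calculate_name_number_spec : Claim_equal_calculate_name_number := by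
  intro name hdom
  unfold Spec_calculate_name_number calculate_name_number calculate_name_number_alt
  simp only []
  rw [pvFoldA, pvFoldB]
  have hchars : ∀ c ∈ name.toList, pvDomChar c = true := by
    intro c hc
    exact List.all_eq_true.mp hdom c hc
  have hmap : (name.toList.map pvContribA).sum = (name.toList.map pvContribB).sum := by
    rw [List.map_congr_left (fun c hc => pvContrib_eq_of_char c (hchars c hc))]
  rw [hmap]
  set t : Int := (name.toList.map pvContribB).sum with ht
  have htnn : 0 ≤ t := by
    apply List.sum_nonneg
    intro x hx
    rcases List.mem_map.mp hx with ⟨c, _, rfl⟩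
    exact pvContribB_nonneg c
  have : t = ((t.toNat : Nat) : Int) := by omega
  rw [this, pv_reduce_natCast]
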